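-- pv_equiv track=rewrite | github.com/username161781/config2 | stage4.py | transitive_predecessors
-- ===== SOURCE A (Python) =====
-- from collections import defaultdict, deque
--
-- def transitive_predecessors(inv_graph, target, max_depth=10):
--     # найдем все узлы, которые могут достичь target (транзитивно), с ограничением глубины.
--     result = set()
--     q = deque([(target, 0)])
--     visited = set([target])
--     while q:
--         node, depth = q.popleft()
--         if depth >= max_depth:
--             continue
--         for pred in inv_graph.get(node, []):
--             if pred not in visited:
--                 visited.add(pred)
--                 result.add(pred)
--                 q.append((pred, depth+1))
--     return result
-- ===== SOURCE B (Python) =====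
-- def transitive_predecessors(inv_graph, target, max_depth=10):
--     # Naive (Datalog-style) fixpoint iteration: no queue, frontier or visited
--     # bookkeeping -- each round replaces the reachable set by itself united
--     # with the predecessors of ALL of its members, stopping when the set
--     # stabilises or after max_depth rounds; target is subtracted at the end.
--     reachable = {target}
--     for _ in range(max_depth):
--         expanded = reachable.union(*(inv_graph.get(n, []) for n in reachable))
--         if len(expanded) == len(reachable):
--             break
--         reachable = expanded
--     return reachable - {target}
-- ===== Notes on version B (the rewrite author's own statement) =====
-- stated objective: alternative
-- what changed: Replaces the worklist BFS (deque of (node, depth) pairs with visited/result sets) by a Datalog-style naive fixpoint: each of at most max_depth rounds unions the whole current reachable set with the predecessors of all its members, stops when the set stabilises, and subtracts target at the end.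
import Mathlib
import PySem

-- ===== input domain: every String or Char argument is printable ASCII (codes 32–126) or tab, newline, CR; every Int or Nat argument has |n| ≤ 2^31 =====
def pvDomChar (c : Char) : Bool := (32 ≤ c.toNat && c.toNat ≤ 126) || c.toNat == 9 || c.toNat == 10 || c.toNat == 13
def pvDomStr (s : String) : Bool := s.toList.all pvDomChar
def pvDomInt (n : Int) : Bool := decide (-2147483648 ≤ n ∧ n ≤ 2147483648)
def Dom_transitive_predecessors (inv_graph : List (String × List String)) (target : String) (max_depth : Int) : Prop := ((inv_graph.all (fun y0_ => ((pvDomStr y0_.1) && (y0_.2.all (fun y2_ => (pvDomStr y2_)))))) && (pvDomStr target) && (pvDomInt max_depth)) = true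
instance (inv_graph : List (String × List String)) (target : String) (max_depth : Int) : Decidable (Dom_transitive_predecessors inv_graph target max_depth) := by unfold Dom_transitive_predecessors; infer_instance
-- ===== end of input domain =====

-- B replaces A's worklist BFS (deque of (node, depth) pairs with visited/result sets) by a
-- naive fixpoint iteration over one reachable set (objective: alternative); both return a
-- Python set, so only the set of elements is observable.

-- ===== PORT A =====
-- inv_graph.get(node, []) (Python built-in used by both programs)
def pvPreds (g : List (String × List String)) (node : String) : List String :=
  PySem.Dict.getD (PySem.Dict.mk g) node []

-- body of A's inner 'for pred in inv_graph.get(node, [])' loop; state = (visited, result, q)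
def pvAIns (d : Int) (st : PySem.Set String × PySem.Set String × List (String × Int))
    (pred : String) : PySem.Set String × PySem.Set String × List (String × Int) :=
  if PySem.Set.contains st.1 pred then st
  else (PySem.Set.add st.1 pred, PySem.Set.add st.2.1 pred, st.2.2 ++ [(pred, d + 1)])

-- A's 'while q' loop; fuel = 1 + Σ|preds| is a guard that only makes the loop total:
-- each pop beyond the first consumes a queue entry appended for a distinct fresh node,
-- and there are at most Σ|preds| of those, so the fuel is never exhausted.
def pvALoop (g : List (String × List String)) (maxd : Int) :
    Nat → List (String × Int) → PySem.Set String → PySem.Set String → List String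
  | 0, _, _, r => r
  | _ + 1, [], _, r => r
  | fuel + 1, (node, depth) :: q, v, r =>
    if maxd ≤ depth then pvALoop g maxd fuel q v r
    else
      let st := (pvPreds g node).foldl (pvAIns depth) (v, r, q)
      pvALoop g maxd fuel st.2.2 st.1 st.2.1

def transitive_predecessors (inv_graph : List (String × List String)) (target : String) (max_depth : Int) : List String :=
  pvALoop inv_graph max_depth (1 + (inv_graph.map (fun kv => kv.2.length)).sum)
    [(target, 0)] (PySem.Set.add PySem.Set.empty target) PySem.Set.empty

-- ===== PORT B =====
-- 'reachable.union(*(inv_graph.get(n, []) for n in reachable))': union of several iterables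
-- = a copy updated with each one in turn; set iteration order is not modelled by PySem, the
-- port scans the set's insertion-ordered element list (the resulting SET does not depend on it).
def pvStep (g : List (String × List String)) (s : PySem.Set String) : PySem.Set String :=
  s.foldl (fun acc node => PySem.Set.update acc (pvPreds g node)) s

-- B's 'for _ in range(max_depth)' loop with the 'len(expanded) == len(reachable): break' test
def pvFixLoop (g : List (String × List String)) :
    Nat → PySem.Set String → PySem.Set String
  | 0, s => s
  | n + 1, s =>
    let e := pvStep g s
    if e.length = s.length then s else pvFixLoop g n e

def transitive_predecessors_alt (inv_graph : List (String × List String)) (target : String) (max_depth : Int) : List String :=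
  PySem.Set.diff (pvFixLoop inv_graph max_depth.toNat (PySem.Set.add PySem.Set.empty target))
    (PySem.Set.add PySem.Set.empty target)

-- ===== PRECONDITION & SPEC =====
def Spec_transitive_predecessors (inv_graph : List (String × List String)) (target : String) (max_depth : Int) (out : List String) : Prop := out = transitive_predecessors_alt inv_graph target max_depth
instance (inv_graph : List (String × List String)) (target : String) (max_depth : Int) (out : List String) : Decidable (Spec_transitive_predecessors inv_graph target max_depth out) := by unfold Spec_transitive_predecessors; infer_instance

-- ===== CLAIM =====
def Claim_equal_transitive_predecessors : Prop := ∀ (inv_graph : List (String × List String)) (target : String) (max_depth : Int), Dom_transitive_predecessors inv_graph target max_depth → Spec_transitive_predecessors inv_graph target max_depth (transitive_predecessors inv_graph target max_depth)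

-- ===== LEMMAS AND PROOFS =====

-- all predecessor occurrences in the graph
def pvAll (g : List (String × List String)) : List String := g.flatMap (fun kv => kv.2)

theorem pvPreds_subset (g : List (String × List String)) (node : String) :
    ∀ x ∈ pvPreds g node, x ∈ pvAll g := by
  induction g with
  | nil => intro x hx; simp [pvPreds, PySem.Dict.getD, PySem.Dict.get?] at hx
  | cons kv rest ih =>
    intro x hx
    rw [pvPreds, PySem.Dict.getD_eq_get?_getD] at hx
    obtain ⟨k, vs⟩ := kv
    rw [PySem.Dict.get?_mk_cons] at hx
    simp only [pvAll, List.flatMap_cons, List.mem_append]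
    by_cases h : k == node
    · rw [if_pos h] at hx; exact Or.inl (by simpa using hx)
    · rw [if_neg h] at hx
      refine Or.inr (ih x ?_)
      rw [pvPreds, PySem.Dict.getD_eq_get?_getD]; exact hx

-- proof-side mirror of A's inner loop carrying a plain next-frontier list
def pvBIns (st : PySem.Set String × PySem.Set String × List String) (pred : String) :
    PySem.Set String × PySem.Set String × List String :=
  if PySem.Set.contains st.1 pred then st
  else (PySem.Set.add st.1 pred, PySem.Set.add st.2.1 pred, st.2.2 ++ [pred])

def pvBNode (g : List (String × List String))
    (st : PySem.Set String × PySem.Set String × List String) (node : String) :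
    PySem.Set String × PySem.Set String × List String :=
  (pvPreds g node).foldl pvBIns st

-- the two inner loops over the same preds list do the same thing; A's queue = rest ++ tagged next frontier
theorem pv_inner_corr (preds : List String) :
    ∀ (v r : PySem.Set String) (q0 : List (String × Int)) (nf : List String) (d : Int),
    preds.foldl (pvAIns d) (v, r, q0 ++ nf.map (fun p => (p, d + 1))) =
      ((preds.foldl pvBIns (v, r, nf)).1, (preds.foldl pvBIns (v, r, nf)).2.1,
        q0 ++ (preds.foldl pvBIns (v, r, nf)).2.2.map (fun p => (p, d + 1))) := by
  induction preds with
  | nil => intro v r q0 nf d; rfl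
  | cons p ps ih =>
    intro v r q0 nf d
    simp only [List.foldl_cons]
    by_cases h : PySem.Set.contains v p
    · simp only [pvAIns, pvBIns, h, if_pos]
      exact ih v r q0 nf d
    · simp only [pvAIns, pvBIns, h, if_neg, Bool.not_eq_true]
      have := ih (PySem.Set.add v p) (PySem.Set.add r p) q0 (nf ++ [p]) d
      simpa [List.map_append, List.append_assoc] using this

-- the inner fold appends the same fresh block to visited, result and next_frontier
theorem pv_bfold_spec (preds : List String) :
    ∀ (v r nf : List String), (∀ x ∈ r, x ∈ v) →
    ∃ fresh : List String,
      preds.foldl pvBIns (v, r, nf) = (v ++ fresh, r ++ fresh, nf ++ fresh) ∧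
      fresh.Nodup ∧ (∀ x ∈ fresh, x ∉ v) ∧ (∀ x ∈ fresh, x ∈ preds) := by
  induction preds with
  | nil => intro v r nf _; exact ⟨[], by simp, by simp, by simp, by simp⟩
  | cons p ps ih =>
    intro v r nf hrv
    simp only [List.foldl_cons]
    by_cases h : p ∈ v
    · rw [show pvBIns (v, r, nf) p = (v, r, nf) by simp [pvBIns, h]]
      obtain ⟨fresh, heq, hnd, hnv, hmem⟩ := ih v r nf hrv
      exact ⟨fresh, heq, hnd, hnv, fun x hx => List.mem_cons_of_mem _ (hmem x hx)⟩
    · have hrp : p ∉ r := fun hr => h (hrv p hr)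
      rw [show pvBIns (v, r, nf) p = (v ++ [p], r ++ [p], nf ++ [p]) by
        simp [pvBIns, h, PySem.Set.add_of_not_mem hrp]]
      obtain ⟨fresh, heq, hnd, hnv, hmem⟩ :=
        ih (v ++ [p]) (r ++ [p]) (nf ++ [p])
          (fun x hx => by
            rcases List.mem_append.mp hx with hx | hx
            · exact List.mem_append.mpr (Or.inl (hrv x hx))
            · exact List.mem_append.mpr (Or.inr hx))
      refine ⟨p :: fresh, ?_, ?_, ?_, ?_⟩
      · rw [heq]; simp
      · exact List.nodup_cons.mpr ⟨fun hp => (hnv p hp) (by simp), hnd⟩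
      · intro x hx
        rcases List.mem_cons.mp hx with rfl | hx
        · exact h
        · intro hv; exact hnv x hx (by simp [hv])
      · intro x hx
        rcases List.mem_cons.mp hx with rfl | hx
        · exact List.mem_cons_self
        · exact List.mem_cons_of_mem _ (hmem x hx)

-- every scanned predecessor ends up in the visited component
theorem pv_bfold_mem (preds : List String) :
    ∀ (v r nf : List String), (∀ x ∈ r, x ∈ v) →
    ∀ x ∈ preds, x ∈ (preds.foldl pvBIns (v, r, nf)).1 := by
  induction preds with
  | nil => intro v r nf _ x hx; cases hx
  | cons p ps ih =>
    intro v r nf hrv x hx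
    simp only [List.foldl_cons]
    by_cases h : p ∈ v
    · rw [show pvBIns (v, r, nf) p = (v, r, nf) by simp [pvBIns, h]]
      rcases List.mem_cons.mp hx with heqx | hx
      · subst heqx
        obtain ⟨fresh, heq, -, -, -⟩ := pv_bfold_spec ps v r nf hrv
        rw [heq]; exact List.mem_append.mpr (Or.inl h)
      · exact ih v r nf hrv x hx
    · have hrp : p ∉ r := fun hr => h (hrv p hr)
      rw [show pvBIns (v, r, nf) p = (v ++ [p], r ++ [p], nf ++ [p]) by
        simp [pvBIns, h, PySem.Set.add_of_not_mem hrp]]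
      have hrv' : ∀ y ∈ r ++ [p], y ∈ v ++ [p] := by
        intro y hy
        rcases List.mem_append.mp hy with hy | hy
        · exact List.mem_append.mpr (Or.inl (hrv y hy))
        · exact List.mem_append.mpr (Or.inr hy)
      rcases List.mem_cons.mp hx with heqx | hx
      · subst heqx
        obtain ⟨fresh, heq, -, -, -⟩ := pv_bfold_spec ps (v ++ [x]) (r ++ [x]) (nf ++ [x]) hrv'
        rw [heq]; simp
      · exact ih (v ++ [p]) (r ++ [p]) (nf ++ [p]) hrv' x hx

-- a frontier fold is the inner fold over the concatenation of all preds lists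
theorem pv_bexpand (g : List (String × List String)) (frontier : List String) :
    ∀ st, frontier.foldl (pvBNode g) st = (frontier.flatMap (pvPreds g)).foldl pvBIns st := by
  induction frontier with
  | nil => intro st; rfl
  | cons c cs ih => intro st; simp only [List.foldl_cons, List.flatMap_cons, List.foldl_append]; exact ih _

theorem pvALoop_nil (g : List (String × List String)) (maxd : Int) (fuel : Nat)
    (v r : PySem.Set String) : pvALoop g maxd fuel [] v r = r := by
  cases fuel <;> rfl

-- once depth ≥ max_depth, A only drains the queue
theorem pv_drain (g : List (String × List String)) (maxd : Int) (cur : List String) :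
    ∀ (fuel : Nat) (v r : PySem.Set String) (d : Int), maxd ≤ d → cur.length ≤ fuel →
    pvALoop g maxd fuel (cur.map (fun p => (p, d))) v r = r := by
  induction cur with
  | nil => intro fuel v r d _ _; exact pvALoop_nil _ _ _ _ _
  | cons c cs ih =>
    intro fuel v r d hd hlen
    match fuel with
    | fuel + 1 =>
      simp only [List.map_cons, pvALoop, if_pos hd]
      exact ih fuel v r d hd (by simpa using Nat.lt_succ_iff.mp (Nat.lt_of_lt_of_le (Nat.lt_succ_of_le (Nat.le_refl _)) (by simpa using hlen)))

-- consuming one whole level of A's queue = one frontier fold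
theorem pv_level (g : List (String × List String)) (maxd : Int) (cur : List String) :
    ∀ (v r : PySem.Set String) (nf : List String) (fuel : Nat) (d : Int),
    d < maxd → cur.length ≤ fuel →
    pvALoop g maxd fuel (cur.map (fun p => (p, d)) ++ nf.map (fun p => (p, d + 1))) v r =
      pvALoop g maxd (fuel - cur.length)
        ((cur.foldl (pvBNode g) (v, r, nf)).2.2.map (fun p => (p, d + 1)))
        (cur.foldl (pvBNode g) (v, r, nf)).1 (cur.foldl (pvBNode g) (v, r, nf)).2.1 := by
  induction cur with
  | nil => intro v r nf fuel d _ _; simp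
  | cons c cs ih =>
    intro v r nf fuel d hd hlen
    match fuel with
    | fuel + 1 =>
      simp only [List.map_cons, List.cons_append, pvALoop, if_neg (not_le.mpr hd)]
      have hin := pv_inner_corr (pvPreds g c) v r (cs.map (fun p => (p, d))) nf d
      simp only [hin]
      have : (pvPreds g c).foldl pvBIns (v, r, nf) = pvBNode g (v, r, nf) c := rfl
      rw [this]
      have hrec := ih (pvBNode g (v, r, nf) c).1 (pvBNode g (v, r, nf) c).2.1
        (pvBNode g (v, r, nf) c).2.2 fuel d hd (by simpa using Nat.succ_le_succ_iff.mp (by simpa using hlen))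
      simp only [List.length_cons, Nat.succ_sub_succ] at hrec ⊢
      exact hrec

theorem pv_nodup_le (r l : List String) (hnd : r.Nodup) (hsub : ∀ x ∈ r, x ∈ l) :
    r.length ≤ l.dedup.length :=
  (hnd.subperm (fun x hx => List.mem_dedup.mpr (hsub x hx))).length_le

-- the visited component of the inner fold is exactly a Set.update
theorem pv_upd_eq (preds : List String) :
    ∀ (st : PySem.Set String × PySem.Set String × List String),
    PySem.Set.update st.1 preds = (preds.foldl pvBIns st).1 := by
  induction preds with
  | nil => intro st; rfl
  | cons p ps ih =>
    intro st
    rw [PySem.Set.update_cons, List.foldl_cons]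
    have h1 : (pvBIns st p).1 = PySem.Set.add st.1 p := by
      by_cases h : p ∈ st.1 <;> simp [pvBIns, PySem.Set.add, h]
    rw [← h1]; exact ih (pvBIns st p)

-- the visited component of a frontier fold is B's round fold
theorem pv_step_first (g : List (String × List String)) (fr : List String) :
    ∀ (st : PySem.Set String × PySem.Set String × List String),
    (fr.foldl (pvBNode g) st).1 =
      fr.foldl (fun acc n => PySem.Set.update acc (pvPreds g n)) st.1 := by
  induction fr with
  | nil => intro st; rfl
  | cons c cs ih =>
    intro st
    simp only [List.foldl_cons]
    rw [ih (pvBNode g st c)]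
    simp only [pvBNode]
    rw [← pv_upd_eq (pvPreds g c) st]

-- updating with elements already present is a no-op
theorem pv_update_absorb (ps : List String) :
    ∀ (s : List String), (∀ p ∈ ps, p ∈ s) → PySem.Set.update s ps = s := by
  induction ps with
  | nil => intro s _; rfl
  | cons p ps ih =>
    intro s h
    rw [PySem.Set.update_cons, PySem.Set.add_of_mem (h p List.mem_cons_self)]
    exact ih s (fun q hq => h q (List.mem_cons_of_mem _ hq))

theorem pv_fold_absorb (g : List (String × List String)) (pre : List String) :
    ∀ (s : List String), (∀ x ∈ pre, ∀ p ∈ pvPreds g x, p ∈ s) →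
    pre.foldl (fun acc n => PySem.Set.update acc (pvPreds g n)) s = s := by
  induction pre with
  | nil => intro s _; rfl
  | cons c cs ih =>
    intro s h
    simp only [List.foldl_cons]
    rw [pv_update_absorb _ s (h c List.mem_cons_self)]
    exact ih s (fun x hx => h x (List.mem_cons_of_mem _ hx))

-- B's round on pre ++ fr, where pre is already fully expanded, is the frontier fold's visited set
theorem pv_step_eq (g : List (String × List String)) (pre fr r : List String)
    (hpre : ∀ x ∈ pre, ∀ p ∈ pvPreds g x, p ∈ pre ++ fr) :
    pvStep g (pre ++ fr) = (fr.foldl (pvBNode g) (pre ++ fr, r, ([] : List String))).1 := by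
  unfold pvStep
  rw [List.foldl_append, pv_fold_absorb g pre _ hpre, pv_step_first]

-- subtracting {target} from target :: r
theorem pv_diff_eq (target : String) (r : List String) (h : target ∉ r) :
    PySem.Set.diff (target :: r)
      (PySem.Set.add PySem.Set.empty target) = r := by
  have hadd : PySem.Set.add PySem.Set.empty target = [target] := rfl
  rw [hadd]
  induction r with
  | nil => simp [PySem.Set.diff]
  | cons x xs ih =>
    have hx : x ≠ target := fun e => h (e ▸ List.mem_cons_self)
    have hxs : target ∉ xs := fun e => h (List.mem_cons_of_mem _ e)
    have := ih hxs
    simp [PySem.Set.diff, List.filter] at this ⊢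
    simpa [hx] using this

-- main invariant: A on the frontier fr at depth d (visited = pre ++ fr = target :: result,
-- preds of pre already visited) equals B with n = (maxd - d).toNat rounds left
theorem pv_main (g : List (String × List String)) (maxd : Int) (target : String) :
    ∀ (n : Nat) (pre fr r : List String) (fuel : Nat) (d : Int),
    n = (maxd - d).toNat →
    pre ++ fr = target :: r →
    (target :: r).Nodup →
    (∀ x ∈ pre, ∀ p ∈ pvPreds g x, p ∈ pre ++ fr) →
    (∀ x ∈ r, x ∈ pvAll g) →
    (pvAll g).dedup.length + fr.length ≤ fuel + r.length →
    pvALoop g maxd fuel (fr.map (fun p => (p, d))) (pre ++ fr) r =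
      PySem.Set.diff (pvFixLoop g n (pre ++ fr)) (PySem.Set.add PySem.Set.empty target) := by
  intro n
  induction n with
  | zero =>
    intro pre fr r fuel d hn hv hnd hpre hrall hfuel
    have hd : maxd ≤ d := by omega
    have hrle : r.length ≤ (pvAll g).dedup.length :=
      pv_nodup_le r _ (List.nodup_cons.mp hnd).2 hrall
    rw [pv_drain g maxd fr fuel _ r d hd (by omega)]
    rw [show pvFixLoop g 0 (pre ++ fr) = pre ++ fr from rfl, hv]
    exact (pv_diff_eq target r (List.nodup_cons.mp hnd).1).symm
  | succ n ih =>
    intro pre fr r fuel d hn hv hnd hpre hrall hfuel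
    have hd : d < maxd := by omega
    have hrle : r.length ≤ (pvAll g).dedup.length :=
      pv_nodup_le r _ (List.nodup_cons.mp hnd).2 hrall
    have hrv : ∀ x ∈ r, x ∈ pre ++ fr := by
      intro x hx; rw [hv]; exact List.mem_cons_of_mem _ hx
    -- the round's effect
    obtain ⟨fresh, heq, hfnd, hfnv, hfmem⟩ :=
      pv_bfold_spec (fr.flatMap (pvPreds g)) (pre ++ fr) r [] hrv
    have hst : fr.foldl (pvBNode g) (pre ++ fr, r, ([] : List String)) =
        ((pre ++ fr) ++ fresh, r ++ fresh, fresh) := by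
      rw [pv_bexpand, heq]; simp
    have hstep : pvStep g (pre ++ fr) = (pre ++ fr) ++ fresh := by
      rw [pv_step_eq g pre fr r hpre, hst]
    have hfresh_all : ∀ x ∈ fresh, x ∈ pvAll g := by
      intro x hx
      obtain ⟨node, _, hxp⟩ := List.mem_flatMap.mp (hfmem x hx)
      exact pvPreds_subset g node x hxp
    -- A consumes the level
    have hflen : fr.length ≤ fuel := by omega
    have hlevel := pv_level g maxd fr (pre ++ fr) r [] fuel d hd hflen
    simp only [List.map_nil, List.append_nil] at hlevel
    rw [hlevel, hst]
    by_cases hfe : fresh = []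
    · -- stabilised: both sides finish with r
      subst hfe
      simp only [List.append_nil, List.map_nil]
      rw [pvALoop_nil]
      have : pvFixLoop g (n + 1) (pre ++ fr) = pre ++ fr := by
        show (if (pvStep g (pre ++ fr)).length = (pre ++ fr).length then _ else _) = _
        rw [hstep]; simp
      rw [this, hv]
      exact (pv_diff_eq target r (List.nodup_cons.mp hnd).1).symm
    · -- a new level: recurse
      have hlen : (pvStep g (pre ++ fr)).length ≠ (pre ++ fr).length := by
        rw [hstep]; simp only [List.length_append]
        have : 0 < fresh.length := List.length_pos_of_ne_nil hfe
        omega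
      have hB : pvFixLoop g (n + 1) (pre ++ fr) = pvFixLoop g n ((pre ++ fr) ++ fresh) := by
        show (if (pvStep g (pre ++ fr)).length = (pre ++ fr).length then _
              else pvFixLoop g n (pvStep g (pre ++ fr))) = _
        rw [if_neg hlen, hstep]
      rw [hB]
      have hndisj : ∀ a ∈ pre ++ fr, ∀ b ∈ fresh, a ≠ b :=
        fun a ha b hb e => hfnv b hb (e ▸ ha)
      have hnd' : (target :: (r ++ fresh)).Nodup := by
        have : ((pre ++ fr) ++ fresh).Nodup := by
          rw [List.nodup_append]
          exact ⟨hv ▸ hnd, hfnd, fun a ha b hb => hndisj a ha b hb⟩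
        rw [hv] at this
        simpa using this
      have hrall' : ∀ x ∈ r ++ fresh, x ∈ pvAll g := by
        intro x hx
        rcases List.mem_append.mp hx with h | h
        · exact hrall x h
        · exact hfresh_all x h
      have hrfle : (r ++ fresh).length ≤ (pvAll g).dedup.length :=
        pv_nodup_le _ _ (List.nodup_cons.mp hnd').2 hrall'
      have hpre' : ∀ x ∈ pre ++ fr, ∀ p ∈ pvPreds g x, p ∈ (pre ++ fr) ++ fresh := by
        intro x hx p hp
        rcases List.mem_append.mp hx with h | h
        · exact List.mem_append.mpr (Or.inl (hpre x h p hp))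
        · have : p ∈ ((fr.flatMap (pvPreds g)).foldl pvBIns (pre ++ fr, r, ([] : List String))).1 :=
            pv_bfold_mem _ _ _ _ hrv p (List.mem_flatMap.mpr ⟨x, h, hp⟩)
          rw [heq] at this; exact this
      have hrec := ih (pre ++ fr) fresh (r ++ fresh) (fuel - fr.length) (d + 1)
        (by omega)
        (by rw [hv]; simp)
        hnd' hpre' hrall'
        (by
          simp only [List.length_append] at hrfle ⊢
          omega)
      rw [List.append_assoc] at hrec ⊢
      exact hrec

-- ===== VERDICT (by name: the statement is the Claim_ definition above) =====
theorem transitive_predecessors_spec : Claim_equal_transitive_predecessors := by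
  intro g t maxd _
  unfold Spec_transitive_predecessors transitive_predecessors transitive_predecessors_alt
  have hadd : PySem.Set.add PySem.Set.empty t = [t] := rfl
  have h := pv_main g maxd t maxd.toNat [] [t] []
    (1 + (g.map (fun kv => kv.2.length)).sum) 0
    (by simp) (by simp) (by simp) (by simp) (by simp)
    (by
      have h1 : (pvAll g).dedup.length ≤ (pvAll g).length := (List.dedup_sublist _).length_le
      have h2 : (pvAll g).length = (g.map (fun kv => kv.2.length)).sum := by
        simp [pvAll, List.length_flatMap]
      simp only [List.length_cons, List.length_nil]
      omega)
  rw [hadd]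
  simpa using h
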